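-- pv_equiv track=rewrite | github.com/preke/asg_demo | asg/demo/taskDes.py | extractTopicIntro
-- ===== SOURCE A (Python) =====
-- def extractTopicIntro(introlist):
--     newintro = []
--     for il in introlist:  # il refer to each introduction
--         newil = []
--         for i in il:  # i refer to each paragraph
--             newit = []
--             for sent in i:  # sent refer to each sentence
--                 if "we" not in sent and "We" not in sent and "this" not in sent and "This" not in sent and "paper" not in sent and "papers" not in sent:  # and "paper" not in sent
--                     newit.append(sent)
--                 else:
--                     if len(newit) > 0:
--                         newil.append(newit)
--                         newit = []
--                     break
--         if len(newil) > 0: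
--             newintro.append(newil)
--     return newintro
-- ===== SOURCE B (Python) =====
-- _KEYS = ("we", "We", "this", "This", "paper", "papers")
--
-- def extractTopicIntro(introlist):
--     newintro = []
--     for il in introlist:
--         newil = []
--         for i in il:
--             idx = next((j for j, sent in enumerate(i)
--                         if any(k in sent for k in _KEYS)), None)
--             if idx is not None and idx > 0:
--                 newil.append(list(i[:idx]))
--         if newil:
--             newintro.append(newil)
--     return newintro
-- ===== Notes on version B (the rewrite author's own statement) =====
-- stated objective: simpler
-- what changed: Replaced the break-driven accumulator loop over sentences by a find-first-keyword-index then take-prefix decomposition per paragraph.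
import Mathlib
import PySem

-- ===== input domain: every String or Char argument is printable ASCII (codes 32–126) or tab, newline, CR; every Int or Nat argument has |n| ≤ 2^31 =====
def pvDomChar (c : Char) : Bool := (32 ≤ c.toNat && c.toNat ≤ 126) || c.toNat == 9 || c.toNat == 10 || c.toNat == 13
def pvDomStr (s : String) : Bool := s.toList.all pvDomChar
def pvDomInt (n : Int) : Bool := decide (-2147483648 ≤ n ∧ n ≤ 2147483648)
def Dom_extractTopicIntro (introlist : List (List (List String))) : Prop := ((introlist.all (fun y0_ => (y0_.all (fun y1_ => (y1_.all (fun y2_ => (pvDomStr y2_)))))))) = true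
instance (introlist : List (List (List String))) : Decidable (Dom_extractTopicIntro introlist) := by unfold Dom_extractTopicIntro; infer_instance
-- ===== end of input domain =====

-- ===== PORT A =====
-- B differs from A by a find-boundary-then-slice decomposition per paragraph (objective: simpler); same return value.
-- Sentence loop of A: accumulate non-keyword sentences; on the first keyword sentence flush the
-- accumulator (if non-empty) into newil and break; the accumulator is dropped if no keyword occurs.
def pvSentLoopA (sents : List String) (newil : List (List String)) (newit : List String) :
    List (List String) :=
  match sents with
  | [] => newil
  | sent :: rest =>
    if !PySem.Str.isIn "we" sent && !PySem.Str.isIn "We" sent && !PySem.Str.isIn "this" sent &&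
       !PySem.Str.isIn "This" sent && !PySem.Str.isIn "paper" sent && !PySem.Str.isIn "papers" sent then
      pvSentLoopA rest newil (newit ++ [sent])
    else
      if newit.length > 0 then newil ++ [newit] else newil

def extractTopicIntro (introlist : List (List (List String))) : List (List (List String)) :=
  introlist.foldl (fun newintro il =>
    let newil := il.foldl (fun newil i => pvSentLoopA i newil []) []
    if newil.length > 0 then newintro ++ [newil] else newintro) []

-- ===== PORT B =====
def pvHasKey (sent : String) : Bool :=
  (["we", "We", "this", "This", "paper", "papers"] : List String).any
    (fun k => PySem.Str.isIn k sent)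

def extractTopicIntro_alt (introlist : List (List (List String))) : List (List (List String)) :=
  introlist.foldl (fun newintro il =>
    let newil := il.foldl (fun newil i =>
      match i.findIdx? pvHasKey with
      | some idx => if idx > 0 then newil ++ [i.take idx] else newil
      | none => newil) []
    if newil.length > 0 then newintro ++ [newil] else newintro) []

-- ===== PRECONDITION & SPEC =====
def Spec_extractTopicIntro (introlist : List (List (List String))) (out : List (List (List String))) : Prop := out = extractTopicIntro_alt introlist
instance (introlist : List (List (List String))) (out : List (List (List String))) : Decidable (Spec_extractTopicIntro introlist out) := by unfold Spec_extractTopicIntro; infer_instance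

-- ===== CLAIM (what is proved, stated in full; the proofs are below) =====
def Claim_equal_extractTopicIntro : Prop := ∀ (introlist : List (List (List String))), Dom_extractTopicIntro introlist → Spec_extractTopicIntro introlist (extractTopicIntro introlist)

-- ===== LEMMAS AND PROOFS =====
theorem pvCondA_eq (sent : String) :
    (!PySem.Str.isIn "we" sent && !PySem.Str.isIn "We" sent && !PySem.Str.isIn "this" sent &&
     !PySem.Str.isIn "This" sent && !PySem.Str.isIn "paper" sent && !PySem.Str.isIn "papers" sent)
      = !pvHasKey sent := by
  simp only [pvHasKey, List.any_cons, List.any_nil, Bool.or_false, Bool.not_or]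
  cases PySem.Str.isIn "we" sent <;> cases PySem.Str.isIn "We" sent <;>
    cases PySem.Str.isIn "this" sent <;> cases PySem.Str.isIn "This" sent <;>
    cases PySem.Str.isIn "paper" sent <;> cases PySem.Str.isIn "papers" sent <;> rfl

theorem pvSentLoopA_eq (sents : List String) (newil : List (List String)) (acc : List String) :
    pvSentLoopA sents newil acc =
      match sents.findIdx? pvHasKey with
      | some j => if acc.length + j > 0 then newil ++ [acc ++ sents.take j] else newil
      | none => newil := by
  induction sents generalizing acc with
  | nil => simp [pvSentLoopA]
  | cons sent rest ih =>
    rw [pvSentLoopA, pvCondA_eq, List.findIdx?_cons]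
    by_cases h : pvHasKey sent = true
    · simp [h]
    · rw [Bool.not_eq_true] at h
      rw [h]
      simp only [Bool.not_false, if_true, Bool.false_eq_true, if_false]
      rw [ih]
      cases hfi : rest.findIdx? pvHasKey with
      | none => simp
      | some j =>
        simp only [Option.map_some, List.take_succ_cons, List.append_assoc,
          List.singleton_append, List.length_append, List.length_cons]
        have h1 : acc.length + 1 + j > 0 := by omega
        simp [h1]

theorem pvInnerFun_eq :
    (fun (newil : List (List String)) (i : List String) => pvSentLoopA i newil []) =
      (fun (newil : List (List String)) (i : List String) =>
        match i.findIdx? pvHasKey with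
        | some idx => if idx > 0 then newil ++ [i.take idx] else newil
        | none => newil) := by
  funext newil i
  rw [pvSentLoopA_eq]
  cases i.findIdx? pvHasKey <;> simp

-- ===== VERDICT (by name: the statement is the Claim_ definition above) =====
theorem extractTopicIntro_spec : Claim_equal_extractTopicIntro := by
  intro introlist _
  unfold Spec_extractTopicIntro extractTopicIntro extractTopicIntro_alt
  rw [pvInnerFun_eq]
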